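-- pv_equiv track=rewrite | github.com/tundrv0l/Group-12-Prod | Chapter-5/methods.py | minimal_elements
-- ===== SOURCE A (Python) =====
-- def minimal_elements(elements, relation):
--     minimals = set()
--
--     for a in elements:
--         for b in elements - {a}:
--             if (b, a) in relation:
--                 break
--         else:
--             minimals.add(a)
--
--     return minimals
-- ===== SOURCE B (Python) =====
-- def minimal_elements(elements, relation):
--     # Single pass over the relation: collect every element that has a
--     # distinct predecessor inside `elements`, then subtract.
--     elems = set(elements)
--     preds = {b for (p, b) in relation if p != b and p in elems}
--     return elems - preds
-- ===== Notes on version B (the rewrite author's own statement) =====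
-- stated objective: faster
-- what changed: Replaced the nested scan (for each element, scan all other elements testing pairs against the relation) by a single pass over the relation collecting elements with a distinct in-set predecessor, then a set subtraction.
import Mathlib
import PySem

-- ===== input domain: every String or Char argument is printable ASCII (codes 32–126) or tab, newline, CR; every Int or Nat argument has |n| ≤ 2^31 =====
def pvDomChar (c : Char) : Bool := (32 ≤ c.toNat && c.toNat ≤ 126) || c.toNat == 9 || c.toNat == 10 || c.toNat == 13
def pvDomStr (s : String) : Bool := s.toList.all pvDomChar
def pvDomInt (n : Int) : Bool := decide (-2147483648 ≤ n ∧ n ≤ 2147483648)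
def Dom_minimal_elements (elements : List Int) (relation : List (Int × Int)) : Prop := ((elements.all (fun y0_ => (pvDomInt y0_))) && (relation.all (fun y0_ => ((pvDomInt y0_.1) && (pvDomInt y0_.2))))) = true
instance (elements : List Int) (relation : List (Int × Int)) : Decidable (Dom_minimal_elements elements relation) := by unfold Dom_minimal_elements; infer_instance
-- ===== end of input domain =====

-- B replaces A's nested scan over elements by one pass over the relation collecting
-- elements with a distinct in-set predecessor, then a set subtraction (objective: faster).

-- ===== PORT A =====
-- For each a in elements, scan elements - {a} breaking on the first b with (b,a) in
-- relation; the for-else adds a to minimals exactly when no such b exists (List.any).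
def minimal_elements (elements : List Int) (relation : List (Int × Int)) : List Int :=
  let es : PySem.Set Int := PySem.Set.ofList elements
  es.foldl
    (fun minimals a =>
      if (PySem.Set.diff es [a]).any (fun b => relation.contains (b, a)) then minimals
      else PySem.Set.add minimals a)
    PySem.Set.empty

-- ===== PORT B =====
def minimal_elements_alt (elements : List Int) (relation : List (Int × Int)) : List Int :=
  let elems : PySem.Set Int := PySem.Set.ofList elements
  let preds : PySem.Set Int :=
    PySem.Set.ofList
      ((relation.filter (fun pb => pb.1 != pb.2 && PySem.Set.contains elems pb.1)).map (·.2))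
  PySem.Set.diff elems preds

-- ===== PRECONDITION & SPEC =====
def Spec_minimal_elements (elements : List Int) (relation : List (Int × Int)) (out : List Int) : Prop := out = minimal_elements_alt elements relation
instance (elements : List Int) (relation : List (Int × Int)) (out : List Int) : Decidable (Spec_minimal_elements elements relation out) := by unfold Spec_minimal_elements; infer_instance

-- ===== CLAIM (what is proved, stated in full; the proofs are below) =====
def Claim_equal_minimal_elements : Prop := ∀ (elements : List Int) (relation : List (Int × Int)), Dom_minimal_elements elements relation → Spec_minimal_elements elements relation (minimal_elements elements relation)

-- ===== LEMMAS AND PROOFS =====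

-- A's loop: folding "add unless p" over a Nodup list, starting from an accumulator
-- disjoint from it, appends exactly the elements where p is false.
theorem foldl_addIf (p : Int → Bool) :
    ∀ (s acc : List Int), s.Nodup → (∀ a ∈ s, a ∉ acc) →
    s.foldl (fun m a => if p a then m else PySem.Set.add m a) acc
      = acc ++ s.filter (fun a => !p a) := by
  intro s
  induction s with
  | nil => simp
  | cons a t ih =>
    intro acc hnd hdisj
    simp only [List.foldl_cons, List.filter_cons]
    rcases List.nodup_cons.mp hnd with ⟨hat, htnd⟩
    by_cases hp : p a = true
    · rw [if_pos hp]
      have h := ih acc htnd (fun b hb => hdisj b (List.mem_cons_of_mem _ hb))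
      simpa [hp] using h
    · have hp' : p a = false := Bool.eq_false_iff.mpr hp
      rw [if_neg hp, PySem.Set.add_of_not_mem (hdisj a (List.mem_cons_self))]
      rw [ih (acc ++ [a]) htnd
        (fun b hb => by
          simp only [List.mem_append, List.mem_singleton]
          rintro (h | rfl)
          · exact hdisj b (List.mem_cons_of_mem _ hb) h
          · exact hat hb)]
      simp [hp']

-- Pointwise agreement of the two "a has a distinct in-set predecessor" tests.
theorem pred_agree (elements : List Int) (relation : List (Int × Int)) (a : Int) :
    ((PySem.Set.diff (PySem.Set.ofList elements) [a]).any (fun b => relation.contains (b, a)))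
      = PySem.Set.contains
          (PySem.Set.ofList
            ((relation.filter (fun pb => pb.1 != pb.2 && PySem.Set.contains (PySem.Set.ofList elements) pb.1)).map (·.2)))
          a := by
  rw [Bool.eq_iff_iff]
  simp only [List.any_eq_true, PySem.Set.contains_iff, PySem.Set.mem_ofList,
    List.mem_map, List.mem_filter, PySem.Set.mem_diff, List.mem_singleton,
    List.contains_eq_mem, decide_eq_true_eq, Bool.and_eq_true, bne_iff_ne]
  constructor
  · rintro ⟨b, ⟨hbe, hba⟩, hrel⟩
    refine ⟨(b, a), ⟨hrel, fun h => hba ?_, hbe⟩, rfl⟩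
    simpa using h
  · rintro ⟨⟨p, b⟩, ⟨hrel, hne, hpe⟩, rfl⟩
    exact ⟨p, ⟨hpe, fun h => hne (by simpa using h)⟩, hrel⟩

-- ===== VERDICT (by name: the statement is the Claim_ definition above) =====
theorem minimal_elements_spec : Claim_equal_minimal_elements := by
  intro elements relation _
  unfold Spec_minimal_elements minimal_elements minimal_elements_alt
  rw [PySem.Set.diff, foldl_addIf _ _ _ (PySem.Set.nodup_ofList elements) (by simp [PySem.Set.empty])]
  simp only [PySem.Set.empty, List.nil_append]
  exact List.filter_congr (fun a _ => by rw [pred_agree])
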